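-- pv_equiv track=rewrite | github.com/posl/comment_recommendation | script/split_gen/2_time/en/135_D/4.py | solve
-- ===== SOURCE A (Python) =====
-- def solve(s):
--     dp = [[0 for i in range(13)] for j in range(len(s) + 1)]
--     dp[0][0] = 1
--     for i in range(len(s)):
--         for j in range(13):
--             if s[i] == '?':
--                 for k in range(10):
--                     dp[i + 1][(j * 10 + k) % 13] += dp[i][j]
--             else:
--                 dp[i + 1][(j * 10 + int(s[i])) % 13] += dp[i][j]
--     return dp[len(s)][5] % (10**9 + 7)
-- ===== SOURCE B (Python) =====
-- def solve(s):
--     # Right-to-left place-value DP: scan the string from the last character to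
--     # the first, keeping counts[r] = number of fillings of the processed suffix
--     # whose value is ≡ r (mod 13), with p = 10^(suffix length) mod 13 carried along.
--     counts = [0] * 13
--     counts[0] = 1
--     p = 1
--     for ch in reversed(s):
--         digits = range(10) if ch == '?' else (int(ch),)
--         new = [0] * 13
--         for r in range(13):
--             for d in digits:
--                 new[(r + d * p) % 13] += counts[r]
--         counts = new
--         p = p * 10 % 13
--     return counts[5] % (10**9 + 7)
-- ===== Notes on version B (the rewrite author's own statement) =====
-- stated objective: alternative
-- what changed: Replaces the left-to-right Horner prefix-residue DP table with a right-to-left place-value DP: scanning from the last character, it carries the weight 10^k mod 13 and counts suffix residues, using a single rolling length-13 array instead of an (n+1)x13 table.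
import Mathlib
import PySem

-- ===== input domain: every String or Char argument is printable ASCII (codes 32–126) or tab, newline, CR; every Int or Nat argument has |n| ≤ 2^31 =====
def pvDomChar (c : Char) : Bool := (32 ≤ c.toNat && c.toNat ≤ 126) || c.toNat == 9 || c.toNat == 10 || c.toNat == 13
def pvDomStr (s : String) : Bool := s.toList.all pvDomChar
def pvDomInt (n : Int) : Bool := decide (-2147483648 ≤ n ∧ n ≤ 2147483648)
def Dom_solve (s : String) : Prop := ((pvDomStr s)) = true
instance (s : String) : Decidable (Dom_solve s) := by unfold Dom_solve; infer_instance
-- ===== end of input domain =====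

-- B replaces A's left-to-right Horner prefix-residue DP with a right-to-left
-- place-value DP carrying 10^k mod 13; same results, different traversal (alternative).

-- row.set with read-modify-write: `row[idx] += v` on a length-13 Python list
def bumpRow (row : List Int) (i : Nat) (v : Int) : List Int :=
  row.set i (row.getD i 0 + v)

-- ===== PORT A =====
-- one iteration of A's `for i in range(len(s))` body: builds dp[i+1] from dp[i] (= prev)
-- `int(s[i])` is ported as `c.toNat - 48`, exact for the digit characters Pre_solve admits
def stepA (prev : List Int) (c : Char) : List Int :=
  (List.range 13).foldl
    (fun row j =>
      if c = '?' then
        (List.range 10).foldl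
          (fun row k => bumpRow row ((j * 10 + k) % 13) (prev.getD j 0)) row
      else
        bumpRow row ((j * 10 + (c.toNat - 48)) % 13) (prev.getD j 0))
    (List.replicate 13 0)

def solve (s : String) : Int :=
  PySem.Int.mod ((s.toList.foldl stepA ((List.replicate 13 0).set 0 1)).getD 5 0) (10 ^ 9 + 7)

-- ===== PORT B =====
-- one iteration of B's right-to-left loop: st = (counts, p) with p = 10^(processed) % 13
def stepB (st : List Int × Nat) (c : Char) : List Int × Nat :=
  let digits : List Nat := if c = '?' then List.range 10 else [c.toNat - 48]
  let new :=
    (List.range 13).foldl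
      (fun row r =>
        digits.foldl (fun row d => bumpRow row ((r + d * st.2) % 13) (st.1.getD r 0)) row)
      (List.replicate 13 0)
  (new, st.2 * 10 % 13)

def solve_alt (s : String) : Int :=
  PySem.Int.mod
    ((s.toList.reverse.foldl stepB ((List.replicate 13 0).set 0 1, 1)).1.getD 5 0)
    (10 ^ 9 + 7)

-- ===== PRECONDITION & SPEC =====
-- Pre_ excludes exactly the strings containing a character that is neither a digit
-- nor '?': there Python A raises ValueError at int(s[i]) (B raises there too).
def Pre_solve (s : String) : Prop :=
  (s.toList.all (fun c => c == '?' || (48 ≤ c.toNat && c.toNat ≤ 57))) = true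
instance (s : String) : Decidable (Pre_solve s) := by unfold Pre_solve; infer_instance

def pvWitness_solve : String := "1?7"

def Spec_solve (s : String) (out : Int) : Prop := out = solve_alt s
instance (s : String) (out : Int) : Decidable (Spec_solve s out) := by unfold Spec_solve; infer_instance

-- ===== CLAIM (what is proved, stated in full; the proofs are below) =====
def Claim_equal_solve : Prop := ∀ (s : String), Dom_solve s → Pre_solve s → Spec_solve s (solve s)

-- ===== LEMMAS AND PROOFS =====

-- the digit choices a pattern character admits
def chDigits (c : Char) : List Nat := if c = '?' then List.range 10 else [c.toNat - 48]

-- all digit fillings of a pattern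
def assigns : List Char → List (List Nat)
  | [] => [[]]
  | c :: t => (chDigits c).flatMap (fun d => (assigns t).map (fun ds => d :: ds))

-- decimal value of a digit list
def V (ds : List Nat) : Nat := ds.foldl (fun a d => a * 10 + d) 0

-- number of fillings of pattern t whose value is ≡ r (mod 13)
def cnt (t : List Char) (r : Nat) : Nat := (assigns t).countP (fun ds => V ds % 13 == r)

lemma length_bumpRow (row : List Int) (i : Nat) (v : Int) :
    (bumpRow row i v).length = row.length := by simp [bumpRow]

lemma getD_bumpRow (row : List Int) (i : Nat) (v : Int) (r : Nat) (hr : r < row.length) :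
    (bumpRow row i v).getD r 0 = row.getD r 0 + (if i = r then v else 0) := by
  unfold bumpRow
  by_cases h : i = r
  · subst h
    simp [List.getD_eq_getElem?_getD, hr]
  · simp [List.getD_eq_getElem?_getD, List.getElem?_set_ne, h]

lemma getD_foldl_bump (L : List (Nat × Int)) (row : List Int) (r : Nat) (hr : r < row.length) :
    (L.foldl (fun acc p => bumpRow acc p.1 p.2) row).getD r 0
      = row.getD r 0 + (L.map (fun p => if p.1 = r then p.2 else 0)).sum := by
  induction L generalizing row with
  | nil => simp
  | cons p L ih =>
    simp only [List.foldl_cons, List.map_cons, List.sum_cons]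
    rw [ih _ (by simpa [length_bumpRow] using hr), getD_bumpRow _ _ _ _ hr]
    ring

lemma stepA_eq (prev : List Int) (c : Char) :
    stepA prev c
      = ((List.range 13).flatMap
          (fun j => (chDigits c).map (fun d => ((j * 10 + d) % 13, prev.getD j 0)))).foldl
          (fun acc p => bumpRow acc p.1 p.2) (List.replicate 13 0) := by
  rw [List.foldl_flatMap]
  unfold stepA chDigits
  by_cases h : c = '?' <;> simp [h, List.foldl_map]

lemma stepB_fst_eq (st : List Int × Nat) (c : Char) :
    (stepB st c).1
      = ((List.range 13).flatMap
          (fun r => (chDigits c).map (fun d => ((r + d * st.2) % 13, st.1.getD r 0)))).foldl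
          (fun acc p => bumpRow acc p.1 p.2) (List.replicate 13 0) := by
  rw [List.foldl_flatMap]
  unfold stepB chDigits
  by_cases h : c = '?' <;> simp [h, List.foldl_map]

lemma sum_flatMap_int {α : Type} (l : List α) (f : α → List Int) :
    (l.flatMap f).sum = (l.map (fun x => (f x).sum)).sum := by
  induction l with
  | nil => rfl
  | cons x l ih => simp [List.flatMap_cons, List.sum_append, ih]

lemma sum_range_ind (n i : Nat) (hi : i < n) (H : Nat → Int) :
    ((List.range n).map (fun j => if i = j then H j else 0)).sum = H i := by
  induction n with
  | zero => omega
  | succ n ih =>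
    rw [List.range_succ, List.map_append, List.sum_append]
    by_cases h : i = n
    · subst h
      have h0 : ((List.range i).map (fun j => if i = j then H j else 0)).sum = 0 := by
        apply List.sum_eq_zero
        intro x hx
        simp only [List.mem_map] at hx
        obtain ⟨j, hj, rfl⟩ := hx
        simp only [List.mem_range] at hj
        simp [Nat.ne_of_gt hj]
      simp [h0]
    · have hi' : i < n := by omega
      simp [ih hi', h]

lemma sum_fiber {α : Type} (l : List α) (f : α → Nat) (hf : ∀ x ∈ l, f x < 13) (H : Nat → Int) :
    (l.map (fun x => H (f x))).sum
      = ((List.range 13).map (fun j => (l.countP (fun x => f x == j) : Int) * H j)).sum := by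
  induction l with
  | nil => simp
  | cons x l ih =>
    have hx : f x < 13 := hf x (by simp)
    have ih' := ih (fun y hy => hf y (by simp [hy]))
    simp only [List.map_cons, List.sum_cons, List.countP_cons]
    rw [ih']
    have hsplit : (List.range 13).map
          (fun j => ((l.countP (fun y => f y == j) + if (f x == j) = true then 1 else 0 : Nat) : Int) * H j)
        = (List.range 13).map
          (fun j => (l.countP (fun y => f y == j) : Int) * H j + (if f x = j then H j else 0)) := by
      apply List.map_congr_left
      intro j _
      by_cases h : f x = j <;> simp [h] <;> ring
    rw [hsplit, PySem.List.sum_map_add_int, sum_range_ind 13 (f x) hx H]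
    ring

lemma countP_mul {α : Type} (l : List α) (p : α → Bool) (a : Int) :
    (l.countP p : Int) * a = (l.map (fun x => if p x = true then a else 0)).sum := by
  induction l with
  | nil => simp
  | cons x l ih =>
    by_cases h : p x = true <;> simp [h, ← ih] <;> ring

lemma sum_swap {α β : Type} (l1 : List α) (l2 : List β) (F : α → β → Int) :
    (l1.map (fun a => (l2.map (fun b => F a b)).sum)).sum
      = (l2.map (fun b => (l1.map (fun a => F a b)).sum)).sum := by
  induction l1 with
  | nil => simp [List.sum_eq_zero]
  | cons a l1 ih =>
    simp only [List.map_cons, List.sum_cons, ih]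
    rw [← PySem.List.sum_map_add_int]

lemma flatMap_single (l : List Nat) : l.flatMap (fun d => [[d]]) = l.map (fun d => [d]) := by
  induction l with
  | nil => rfl
  | cons d l ih => simp_all [List.flatMap_cons]

lemma assigns_snoc (t : List Char) (c : Char) :
    assigns (t ++ [c]) = (assigns t).flatMap (fun ds => (chDigits c).map (fun d => ds ++ [d])) := by
  induction t with
  | nil => simp [assigns, flatMap_single]
  | cons a t ih =>
    simp [assigns, ih, List.map_flatMap, List.flatMap_map, List.map_map, Function.comp_def,
      List.flatMap_assoc]

lemma V_snoc (ds : List Nat) (d : Nat) : V (ds ++ [d]) = V ds * 10 + d := by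
  simp [V, List.foldl_append]

lemma V_horner (ds : List Nat) : ∀ a : Nat, ds.foldl (fun x d => x * 10 + d) a = a * 10 ^ ds.length + V ds := by
  induction ds with
  | nil => intro a; simp [V]
  | cons d ds ih =>
    intro a
    have hV : V (d :: ds) = d * 10 ^ ds.length + V ds := by
      show (d :: ds).foldl (fun x d => x * 10 + d) 0 = _
      simp only [List.foldl_cons, Nat.zero_mul, Nat.zero_add]
      rw [ih d]
    simp only [List.foldl_cons, List.length_cons, hV]
    rw [ih (a * 10 + d)]
    ring

lemma V_cons (d : Nat) (ds : List Nat) : V (d :: ds) = d * 10 ^ ds.length + V ds := by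
  show (d :: ds).foldl (fun x d => x * 10 + d) 0 = _
  simp only [List.foldl_cons, Nat.zero_mul, Nat.zero_add]
  rw [V_horner ds d]

lemma mem_assigns_length (t : List Char) (ds : List Nat) (h : ds ∈ assigns t) :
    ds.length = t.length := by
  induction t generalizing ds with
  | nil => simp [assigns] at h; simp [h]
  | cons c t ih =>
    simp only [assigns, List.mem_flatMap, List.mem_map] at h
    obtain ⟨d, _, ds', hds', rfl⟩ := h
    simp [ih ds' hds']

lemma cnt_snoc (t : List Char) (c : Char) (r : Nat) :
    (cnt (t ++ [c]) r : Int)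
      = ((List.range 13).map (fun j =>
          ((chDigits c).map (fun d =>
            if (j * 10 + d) % 13 = r then (cnt t j : Int) else 0)).sum)).sum := by
  unfold cnt
  rw [assigns_snoc, List.countP_flatMap]
  have h1 : ∀ ds ∈ assigns t,
      (List.countP (fun ds' => V ds' % 13 == r) ∘ fun ds => (chDigits c).map (fun d => ds ++ [d])) ds
        = (chDigits c).countP (fun d => ((V ds % 13) * 10 + d) % 13 == r) := by
    intro ds _
    simp only [Function.comp_apply, List.countP_map]
    apply List.countP_congr
    intro d _
    have hV : V (ds ++ [d]) % 13 = ((V ds % 13) * 10 + d) % 13 := by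
      rw [V_snoc, Nat.add_mod (V ds * 10) d, Nat.add_mod (V ds % 13 * 10) d, Nat.mod_mul_mod]
    simp [hV]
  rw [List.map_congr_left h1, Nat.cast_list_sum, List.map_map]
  have h2 := sum_fiber (assigns t) (fun ds => V ds % 13)
      (fun ds _ => Nat.mod_lt _ (by norm_num))
      (fun j => ((chDigits c).countP (fun d => (j * 10 + d) % 13 == r) : Int))
  simp only [Function.comp_def]
  rw [h2]
  apply congrArg List.sum
  apply List.map_congr_left
  intro j _
  rw [mul_comm, countP_mul]
  apply congrArg List.sum
  apply List.map_congr_left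
  intro d _
  by_cases h : (j * 10 + d) % 13 = r <;> simp [h]

lemma cnt_cons (c : Char) (u : List Char) (r : Nat) :
    (cnt (c :: u) r : Int)
      = ((List.range 13).map (fun j =>
          ((chDigits c).map (fun d =>
            if (j + d * (10 ^ u.length % 13)) % 13 = r then (cnt u j : Int) else 0)).sum)).sum := by
  unfold cnt
  rw [show assigns (c :: u) = (chDigits c).flatMap (fun d => (assigns u).map (fun ds => d :: ds)) from rfl]
  rw [List.countP_flatMap]
  have h1 : ∀ d ∈ chDigits c,
      (List.countP (fun ds => V ds % 13 == r) ∘ fun d => (assigns u).map (fun ds => d :: ds)) d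
        = (assigns u).countP (fun ds => (V ds % 13 + d * (10 ^ u.length % 13)) % 13 == r) := by
    intro d _
    simp only [Function.comp_apply, List.countP_map]
    apply List.countP_congr
    intro ds hds
    have hlen := mem_assigns_length u ds hds
    have hV : V (d :: ds) % 13 = (V ds % 13 + d * (10 ^ u.length % 13)) % 13 := by
      rw [V_cons, hlen, Nat.add_comm (d * 10 ^ u.length) (V ds),
        Nat.add_mod (V ds) (d * 10 ^ u.length),
        Nat.add_mod (V ds % 13) (d * (10 ^ u.length % 13))]
      congr 2
      · exact (Nat.mod_mod_of_dvd _ (dvd_refl 13)).symm ▸ rfl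
      · conv_lhs => rw [Nat.mul_mod]
        conv_rhs => rw [Nat.mul_mod]
        rw [Nat.mod_mod_of_dvd _ (dvd_refl 13)]
    simp [hV]
  rw [List.map_congr_left h1, Nat.cast_list_sum, List.map_map]
  have h2 : ∀ d ∈ chDigits c,
      (Nat.cast ∘ fun d => (assigns u).countP (fun ds => (V ds % 13 + d * (10 ^ u.length % 13)) % 13 == r)) d
        = ((List.range 13).map (fun j =>
            if (j + d * (10 ^ u.length % 13)) % 13 = r then (cnt u j : Int) else 0)).sum := by
    intro d _
    simp only [Function.comp_apply]
    rw [← PySem.List.sum_map_ite_one_zero (fun ds => (V ds % 13 + d * (10 ^ u.length % 13)) % 13 == r) (assigns u)]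
    have h3 := sum_fiber (assigns u) (fun ds => V ds % 13)
        (fun ds _ => Nat.mod_lt _ (by norm_num))
        (fun j => if (j + d * (10 ^ u.length % 13)) % 13 = r then (1 : Int) else 0)
    have h4 : (assigns u).map (fun ds => if ((V ds % 13 + d * (10 ^ u.length % 13)) % 13 == r) = true then (1:Int) else 0)
        = (assigns u).map (fun ds => (fun j => if (j + d * (10 ^ u.length % 13)) % 13 = r then (1 : Int) else 0) (V ds % 13)) := by
      apply List.map_congr_left
      intro ds _
      by_cases h : (V ds % 13 + d * (10 ^ u.length % 13)) % 13 = r <;> simp [h]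
    rw [h4, h3]
    apply congrArg List.sum
    apply List.map_congr_left
    intro j _
    by_cases h : (j + d * (10 ^ u.length % 13)) % 13 = r <;> simp [h, cnt]
  rw [List.map_congr_left h2]
  exact sum_swap (chDigits c) (List.range 13) _

lemma foldA_spec (t : List Char) : ∀ r : Nat, r < 13 →
    (t.foldl stepA ((List.replicate 13 0).set 0 1)).getD r 0 = (cnt t r : Int) := by
  induction t using List.reverseRecOn with
  | nil => intro r hr; interval_cases r <;> decide
  | append_singleton t c ih =>
    intro r hr
    rw [List.foldl_append]
    simp only [List.foldl_cons, List.foldl_nil]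
    rw [stepA_eq, getD_foldl_bump _ _ r (by simpa using hr)]
    have hbase : (List.replicate 13 (0:Int)).getD r 0 = 0 := by
      interval_cases r <;> rfl
    rw [hbase, zero_add, List.map_flatMap, sum_flatMap_int, cnt_snoc]
    apply congrArg List.sum
    apply List.map_congr_left
    intro j hj
    rw [List.map_map]
    apply congrArg List.sum
    apply List.map_congr_left
    intro d _
    simp only [Function.comp_apply]
    rw [ih j (List.mem_range.mp hj)]

lemma foldB_snd (l : List Char) :
    (l.foldl stepB ((List.replicate 13 0).set 0 1, 1)).2 = 10 ^ l.length % 13 := by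
  induction l using List.reverseRecOn with
  | nil => rfl
  | append_singleton l c ih =>
    rw [List.foldl_append]
    simp only [List.foldl_cons, List.foldl_nil]
    show (_ * 10 % 13 : Nat) = _
    rw [ih, Nat.mod_mul_mod]
    simp [pow_succ]

lemma foldB_spec (l : List Char) : ∀ r : Nat, r < 13 →
    ((l.foldl stepB ((List.replicate 13 0).set 0 1, 1)).1).getD r 0 = (cnt l.reverse r : Int) := by
  induction l using List.reverseRecOn with
  | nil => intro r hr; interval_cases r <;> decide
  | append_singleton l c ih =>
    intro r hr
    rw [List.foldl_append]
    simp only [List.foldl_cons, List.foldl_nil]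
    rw [stepB_fst_eq, getD_foldl_bump _ _ r (by simpa using hr)]
    have hbase : (List.replicate 13 (0:Int)).getD r 0 = 0 := by
      interval_cases r <;> rfl
    rw [hbase, zero_add, List.map_flatMap, sum_flatMap_int]
    rw [List.reverse_append]
    simp only [List.reverse_singleton, List.singleton_append]
    rw [cnt_cons, foldB_snd]
    have hlen : l.reverse.length = l.length := List.length_reverse
    rw [hlen]
    apply congrArg List.sum
    apply List.map_congr_left
    intro j hj
    rw [List.map_map]
    apply congrArg List.sum
    apply List.map_congr_left
    intro d _
    simp only [Function.comp_apply]
    rw [ih j (List.mem_range.mp hj)]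

-- ===== VERDICT (by name: the statement is the Claim_ definition above) =====
theorem solve_spec : Claim_equal_solve := by
  intro s _ _
  unfold Spec_solve solve solve_alt
  rw [foldA_spec s.toList 5 (by norm_num), foldB_spec s.toList.reverse 5 (by norm_num),
    List.reverse_reverse]
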